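-- pv_equiv track=rewrite | github.com/maliksikander/controller | actions/utils/utility.py | is_all_agent_in_wrap_up
-- ===== SOURCE A (Python) =====
-- def is_all_agent_in_wrap_up(conversation):
--     participants = conversation['participants']
--     agent_count = 0
--     agent_wrap_up_count = 0
--     if participants is None:
--         return False
--
--     for p in participants:
--         if p['type'] == 'AGENT':
--             agent_count += 1
--             if p['role'] == 'WRAP_UP':
--                 agent_wrap_up_count += 1
--
--     return agent_count > 0 and agent_count == agent_wrap_up_count
-- ===== SOURCE B (Python) =====
-- def _scan(ps):
--     # (has_agent, all_agents_in_wrap_up) for the non-empty chunk ps,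
--     # computed by divide and conquer with the (or, and) combine
--     if len(ps) == 1:
--         p = ps[0]
--         if p['type'] == 'AGENT':
--             return (True, p['role'] == 'WRAP_UP')
--         return (False, True)
--     mid = len(ps) // 2
--     h1, a1 = _scan(ps[:mid])
--     h2, a2 = _scan(ps[mid:])
--     return (h1 or h2, a1 and a2)
--
-- def is_all_agent_in_wrap_up(conversation):
--     participants = conversation['participants']
--     if participants is None:
--         return False
--     if not participants:
--         return False
--     has_agent, all_wrap = _scan(participants)
--     return has_agent and all_wrap
-- ===== Notes on version B (the rewrite author's own statement) =====
-- stated objective: alternative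
-- what changed: Replaces A's linear two-counter accumulation pass by a divide-and-conquer recursion that splits the participant list in half and combines (has_agent, all_agents_wrap_up) pairs with (or, and).
import Mathlib
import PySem

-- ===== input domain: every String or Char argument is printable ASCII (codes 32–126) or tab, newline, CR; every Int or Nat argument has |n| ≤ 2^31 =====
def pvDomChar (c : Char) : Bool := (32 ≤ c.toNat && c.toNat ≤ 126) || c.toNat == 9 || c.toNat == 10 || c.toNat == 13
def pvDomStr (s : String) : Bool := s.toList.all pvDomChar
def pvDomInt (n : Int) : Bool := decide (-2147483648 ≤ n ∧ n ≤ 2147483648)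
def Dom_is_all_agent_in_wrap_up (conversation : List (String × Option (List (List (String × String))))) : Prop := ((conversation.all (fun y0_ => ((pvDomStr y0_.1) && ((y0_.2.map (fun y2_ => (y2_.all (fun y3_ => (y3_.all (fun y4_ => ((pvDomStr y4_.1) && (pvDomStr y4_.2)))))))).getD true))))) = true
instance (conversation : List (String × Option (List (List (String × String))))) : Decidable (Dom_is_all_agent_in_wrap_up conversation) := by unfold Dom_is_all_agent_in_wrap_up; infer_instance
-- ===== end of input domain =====

-- B replaces A's linear two-counter pass by a divide-and-conquer recursion combining
-- (has_agent, all_agents_wrap_up) pairs with (or, and) (objective: alternative).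

-- ===== PORT A =====
-- dict lookup p['k']; the .getD default is only reached where Python raises KeyError,
-- which Pre_ excludes
def pvLookup (d : List (String × String)) (k : String) : String :=
  (d.lookup k).getD ""

def is_all_agent_in_wrap_up (conversation : List (String × Option (List (List (String × String))))) : Bool :=
  match (conversation.lookup "participants").getD none with
  | none => false
  | some participants =>
    let counts : Int × Int := participants.foldl
      (fun (c : Int × Int) p =>
        if pvLookup p "type" == "AGENT" then
          (c.1 + 1, if pvLookup p "role" == "WRAP_UP" then c.2 + 1 else c.2)
        else c)
      (0, 0)
    decide (counts.1 > 0 ∧ counts.1 = counts.2)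

-- ===== PORT B =====
-- _scan: divide and conquer on a non-empty chunk; slices ps[:mid]/ps[mid:] become take/drop
def pvScan (ps0 : List (List (String × String))) : Bool × Bool :=
  match ps0 with
  | [] => (false, true)   -- unreachable: _scan is only called on non-empty lists
  | [p] =>
    if pvLookup p "type" == "AGENT" then (true, pvLookup p "role" == "WRAP_UP")
    else (false, true)
  | p1 :: p2 :: rest =>
    let ps := p1 :: p2 :: rest
    let mid := ps.length / 2
    let r1 := pvScan (ps.take mid)
    let r2 := pvScan (ps.drop mid)
    (r1.1 || r2.1, r1.2 && r2.2)
termination_by ps0.length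
decreasing_by
  · simp [List.length_take]; omega
  · simp [List.length_drop]; omega

def is_all_agent_in_wrap_up_alt (conversation : List (String × Option (List (List (String × String))))) : Bool :=
  match (conversation.lookup "participants").getD none with
  | none => false
  | some participants =>
    if participants.isEmpty then false
    else
      let r := pvScan participants
      r.1 && r.2

-- ===== PRECONDITION & SPEC =====
-- Pre_ excludes exactly the inputs where Python A raises KeyError: a missing
-- 'participants' key, a participant without 'type', or an AGENT without 'role'.
def Pre_is_all_agent_in_wrap_up (conversation : List (String × Option (List (List (String × String))))) : Prop :=
  (conversation.lookup "participants").isSome = true ∧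
  (((conversation.lookup "participants").getD none).getD []).all
    (fun p => (p.lookup "type").isSome &&
      (!(pvLookup p "type" == "AGENT") || (p.lookup "role").isSome)) = true
instance (conversation : List (String × Option (List (List (String × String))))) : Decidable (Pre_is_all_agent_in_wrap_up conversation) := by unfold Pre_is_all_agent_in_wrap_up; infer_instance

def pvWitness_is_all_agent_in_wrap_up : (List (String × Option (List (List (String × String))))) :=
  [("participants", some [[("type", "AGENT"), ("role", "WRAP_UP")], [("type", "CUSTOMER")]])]

def Spec_is_all_agent_in_wrap_up (conversation : List (String × Option (List (List (String × String))))) (out : Bool) : Prop := out = is_all_agent_in_wrap_up_alt conversation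
instance (conversation : List (String × Option (List (List (String × String))))) (out : Bool) : Decidable (Spec_is_all_agent_in_wrap_up conversation out) := by unfold Spec_is_all_agent_in_wrap_up; infer_instance

-- ===== CLAIM (what is proved, stated in full; the proofs are below) =====
def Claim_equal_is_all_agent_in_wrap_up : Prop := ∀ (conversation : List (String × Option (List (List (String × String))))), Dom_is_all_agent_in_wrap_up conversation → Pre_is_all_agent_in_wrap_up conversation → Spec_is_all_agent_in_wrap_up conversation (is_all_agent_in_wrap_up conversation)

-- ===== LEMMAS AND PROOFS =====

def agentP (p : List (String × String)) : Bool := pvLookup p "type" == "AGENT"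
def wrapP (p : List (String × String)) : Bool := !agentP p || (pvLookup p "role" == "WRAP_UP")

-- the divide-and-conquer scan computes (∃ agent, ∀ agent is in wrap-up)
theorem pvScan_eq (ps : List (List (String × String))) :
    pvScan ps = (ps.any agentP, ps.all wrapP) := by
  induction hn : ps.length using Nat.strong_induction_on generalizing ps with
  | _ n ih =>
    match ps with
    | [] => simp [pvScan]
    | [p] =>
      by_cases h : (pvLookup p "type" == "AGENT") = true
      · simp [pvScan, agentP, wrapP, h]
      · simp [pvScan, agentP, wrapP, h]
    | p1 :: p2 :: rest =>
      rw [pvScan]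
      set l := p1 :: p2 :: rest with hl
      have hlen : l.length = n := hn
      have hmidlt : l.length / 2 < l.length := by
        simp only [hl, List.length_cons]; omega
      have hmidpos : 0 < l.length / 2 := by
        simp only [hl, List.length_cons]; omega
      have h1 : (l.take (l.length / 2)).length < n := by
        rw [← hlen]; simpa [List.length_take] using hmidlt
      have h2 : (l.drop (l.length / 2)).length < n := by
        rw [← hlen]; simp only [List.length_drop]; omega
      rw [ih _ h1 _ rfl, ih _ h2 _ rfl]
      have hsplit := List.take_append_drop (l.length / 2) l
      have e1 : l.any agentP
          = ((l.take (l.length / 2)).any agentP || (l.drop (l.length / 2)).any agentP) := by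
        conv_lhs => rw [← hsplit]
        exact List.any_append
      have e2 : l.all wrapP
          = ((l.take (l.length / 2)).all wrapP && (l.drop (l.length / 2)).all wrapP) := by
        conv_lhs => rw [← hsplit]
        exact List.all_append
      rw [e1, e2]

-- A's fold computes (start + #agents, start + #wrap-up agents)
theorem fold_counts (ps : List (List (String × String))) (c : Int × Int) :
    ps.foldl
      (fun (c : Int × Int) p =>
        if pvLookup p "type" == "AGENT" then
          (c.1 + 1, if pvLookup p "role" == "WRAP_UP" then c.2 + 1 else c.2)
        else c)
      c
    = (c.1 + (ps.filter agentP).length,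
       c.2 + ((ps.filter agentP).filter
              (fun p => pvLookup p "role" == "WRAP_UP")).length) := by
  induction ps generalizing c with
  | nil => simp
  | cons p ps ih =>
    rw [List.foldl_cons, ih]
    by_cases h : agentP p = true
    · have h' : (pvLookup p "type" == "AGENT") = true := h
      by_cases h2 : (pvLookup p "role" == "WRAP_UP") = true
      · simp only [h', h, h2, if_true, List.filter_cons, List.length_cons, Prod.mk.injEq]
        constructor <;> push_cast <;> ring
      · simp only [h', h, h2, if_true, List.filter_cons, List.length_cons, Prod.mk.injEq]
        constructor <;> push_cast <;> ring
    · have h' : (pvLookup p "type" == "AGENT") = false := by simpa [agentP] using h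
      simp [h, h']

theorem core_eq (conversation : List (String × Option (List (List (String × String))))) :
    is_all_agent_in_wrap_up conversation = is_all_agent_in_wrap_up_alt conversation := by
  unfold is_all_agent_in_wrap_up is_all_agent_in_wrap_up_alt
  cases hp : (conversation.lookup "participants").getD none with
  | none => rfl
  | some ps =>
    simp only [fold_counts, pvScan_eq]
    set agents := ps.filter agentP with hag
    set wra := agents.filter (fun p => pvLookup p "role" == "WRAP_UP") with hw
    by_cases hpos : 0 < agents.length
    · have hany : ps.any agentP = true := by
        rcases List.exists_mem_of_length_pos hpos with ⟨a, ha⟩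
        have := (List.mem_filter.1 (hag ▸ ha))
        exact List.any_eq_true.2 ⟨a, this.1, this.2⟩
      have hne : ps.isEmpty = false := by
        cases ps with
        | nil => simp [hag] at hpos
        | cons _ _ => rfl
      by_cases hall : agents.all (fun p => pvLookup p "role" == "WRAP_UP") = true
      · have hlen : wra.length = agents.length := by
          rw [hw]
          exact (List.length_filter_eq_length_iff).2 (by simpa [List.all_eq_true] using hall)
        have hwrap : ps.all wrapP = true := by
          simp only [List.all_eq_true] at hall ⊢
          intro p hpm
          by_cases ha : agentP p = true
          · have : p ∈ agents := hag ▸ List.mem_filter.2 ⟨hpm, ha⟩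
            simp [wrapP, ha, hall p this]
          · simp [wrapP, ha]
        simp [hne, hany, hwrap, hlen, hpos]
      · have hne2 : wra.length ≠ agents.length := by
          intro h
          exact hall (by
            simp only [List.all_eq_true]
            exact (List.length_filter_eq_length_iff).1 (by rw [← hw, h]))
        have hiff : ¬ ((agents.length : Int) = wra.length) := by
          intro h; exact hne2 (by exact_mod_cast h.symm)
        have hwrap : ps.all wrapP = false := by
          have hallF : agents.all (fun p => pvLookup p "role" == "WRAP_UP") = false :=
            Bool.eq_false_iff.2 hall
          rcases List.all_eq_false.1 hallF with ⟨a, ham, hrole⟩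
          have ha : agentP a = true := (List.mem_filter.1 (hag ▸ ham)).2
          have hm : a ∈ ps := (List.mem_filter.1 (hag ▸ ham)).1
          apply List.all_eq_false.2
          exact ⟨a, hm, by simp [wrapP, ha]; simpa using hrole⟩
        simp [hne, hwrap, hiff]
    · have h0 : agents = [] := List.length_eq_zero_iff.1 (by omega)
      have hany : ps.any agentP = false := by
        apply Bool.eq_false_iff.2
        intro hct
        rcases List.any_eq_true.1 hct with ⟨a, hm, ha⟩
        have : a ∈ agents := hag ▸ List.mem_filter.2 ⟨hm, ha⟩
        simp [h0] at this
      by_cases hne : ps.isEmpty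
      · simp [hne, h0]
      · simp [hne, hany, h0]

-- ===== VERDICT (by name: the statement is the Claim_ definition above) =====
theorem is_all_agent_in_wrap_up_spec : Claim_equal_is_all_agent_in_wrap_up := by
  intro conversation _ _
  unfold Spec_is_all_agent_in_wrap_up
  exact core_eq conversation
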